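-- pv_equiv track=rewrite | github.com/solyarikai/Sally_sales | backend/app/services/search_service.py | check_for_captcha
-- ===== SOURCE A (Python) =====
-- def check_for_captcha(html: str) -> bool:
--     """Check if response contains a CAPTCHA."""
--     indicators = [
--         "unusual traffic", "captcha", "recaptcha",
--         "sorry/index", "detected unusual traffic",
--         "automated queries", "please verify",
--     ]
--     html_lower = html.lower()
--     return any(ind in html_lower for ind in indicators)
-- ===== SOURCE B (Python) =====
-- def check_for_captcha(html: str) -> bool:
--     """Single left-to-right scan: at each position, test whether any indicator starts there."""
--     indicators = ("unusual traffic", "captcha", "recaptcha", "sorry/index",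
--                   "detected unusual traffic", "automated queries", "please verify")
--     t = html.lower()
--     for i in range(len(t) + 1):
--         for ind in indicators:
--             if t.startswith(ind, i):
--                 return True
--     return False
-- ===== Notes on version B (the rewrite author's own statement) =====
-- stated objective: alternative
-- what changed: B replaces A's seven independent substring scans (one 'in' test per indicator) with a single left-to-right pass over the lowered text that at each position tests whether any indicator starts there (startswith with a start offset), returning True at the first hit.
import Mathlib
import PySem

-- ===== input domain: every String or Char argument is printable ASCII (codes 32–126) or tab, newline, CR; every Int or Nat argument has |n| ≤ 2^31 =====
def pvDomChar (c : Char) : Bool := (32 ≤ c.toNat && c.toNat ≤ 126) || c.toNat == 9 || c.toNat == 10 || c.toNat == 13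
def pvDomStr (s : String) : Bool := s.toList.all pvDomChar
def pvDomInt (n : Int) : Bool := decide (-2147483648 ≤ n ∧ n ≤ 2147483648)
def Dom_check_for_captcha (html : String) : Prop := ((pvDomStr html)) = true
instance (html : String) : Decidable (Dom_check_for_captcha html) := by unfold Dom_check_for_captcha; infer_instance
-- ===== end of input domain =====

-- B replaces A's seven independent substring ('in') scans with one left-to-right pass over the
-- lowered text that at each position tests whether any indicator starts there (alternative; same cost).

-- ===== PORT A =====
def check_for_captcha (html : String) : Bool :=
  let indicators : List String :=
    ["unusual traffic", "captcha", "recaptcha",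
     "sorry/index", "detected unusual traffic",
     "automated queries", "please verify"]
  let html_lower := PySem.Str.lower html
  indicators.any (fun ind => PySem.Str.isIn ind html_lower)

-- ===== PORT B =====
def altIndicators : List (List Char) :=
  ["unusual traffic".toList, "captcha".toList, "recaptcha".toList,
   "sorry/index".toList, "detected unusual traffic".toList,
   "automated queries".toList, "please verify".toList]

-- the single pass: at each suffix (= each start position) test every indicator with startswith
def scanB (inds : List (List Char)) : List Char → Bool
  | [] => inds.any (fun ind => PySem.Chars.startswith [] ind)
  | c :: t => inds.any (fun ind => PySem.Chars.startswith (c :: t) ind) || scanB inds t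

def check_for_captcha_alt (html : String) : Bool :=
  scanB altIndicators (PySem.Chars.lower html.toList)

-- ===== PRECONDITION & SPEC =====
def Spec_check_for_captcha (html : String) (out : Bool) : Prop := out = check_for_captcha_alt html
instance (html : String) (out : Bool) : Decidable (Spec_check_for_captcha html out) := by unfold Spec_check_for_captcha; infer_instance

-- ===== CLAIM (what is proved, stated in full; the proofs are below) =====
def Claim_equal_check_for_captcha : Prop := ∀ (html : String), Dom_check_for_captcha html → Spec_check_for_captcha html (check_for_captcha html)

-- ===== LEMMAS AND PROOFS =====

lemma isIn_nil_eq_startswith (ind : List Char) :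
    PySem.Chars.isIn ind [] = PySem.Chars.startswith [] ind := by
  rcases ind with _ | ⟨c, t⟩
  · simp [PySem.Chars.isIn_nil, PySem.Chars.startswith_iff]
  · rw [Bool.eq_iff_iff]
    simp [PySem.Chars.isIn_iff_infix, PySem.Chars.startswith_iff]

lemma isIn_cons (ind : List Char) (c : Char) (t : List Char) :
    PySem.Chars.isIn ind (c :: t)
      = (PySem.Chars.startswith (c :: t) ind || PySem.Chars.isIn ind t) := by
  rw [Bool.eq_iff_iff]
  simp [PySem.Chars.isIn_iff_infix, PySem.Chars.startswith_iff, List.infix_cons_iff]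

lemma scanB_eq (inds : List (List Char)) (s : List Char) :
    scanB inds s = inds.any (fun ind => PySem.Chars.isIn ind s) := by
  induction s with
  | nil =>
      simp only [scanB]
      congr 1
      funext ind
      exact (isIn_nil_eq_startswith ind).symm
  | cons c t ih =>
      simp only [scanB, ih]
      rw [Bool.eq_iff_iff]
      simp only [Bool.or_eq_true, List.any_eq_true, isIn_cons]
      constructor
      · rintro (⟨i, hi, h⟩ | ⟨i, hi, h⟩) <;> exact ⟨i, hi, by simp [h]⟩
      · rintro ⟨i, hi, h | h⟩
        · exact Or.inl ⟨i, hi, h⟩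
        · exact Or.inr ⟨i, hi, h⟩

-- ===== VERDICT (by name: the statement is the Claim_ definition above) =====
theorem check_for_captcha_spec : Claim_equal_check_for_captcha := by
  intro html _
  unfold Spec_check_for_captcha check_for_captcha check_for_captcha_alt altIndicators
  rw [scanB_eq]
  simp [PySem.Str.isIn_eq, PySem.Str.toList_lower]
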